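-- pv_equiv track=rewrite | github.com/charlienabarro/ads_coursework | q4.py | ordering
-- ===== SOURCE A (Python) =====
-- def ordering(k):
--     """
--     Returns a Boldon House ordering of size k.
--     """
--     result = []
--     def backtrack(current, mod_list):
--
--         if len(current) == k:
--             is_monotone = True
--             for i in range(1, len(mod_list)):
--                 if mod_list[i] < mod_list[i - 1]:
--                     is_monotone = False
--                     break
--             if is_monotone:
--                 result.append(current[:])
--             return
--
--         for num in range(k):
--             if num not in current:
--                 if len(current) > 0:
--                     diff = (num - current[-1]) % k
--                     new_mod_list = mod_list + [diff]
--                 else: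
--                     new_mod_list = mod_list
--
--                 if len(new_mod_list) < 2 or new_mod_list[-1] >= new_mod_list[-2]:
--                     current.append(num)
--                     backtrack(current, new_mod_list)
--                     if result:
--                         return
--                     current.pop()
--
--     backtrack([], [])
--
--     return result[0] if result else []
-- ===== SOURCE B (Python) =====
-- def ordering(k):
--     """
--     Returns a Boldon House ordering of size k.
--
--     The first permutation the backtracking search accepts is always the
--     identity 0,1,...,k-1 (its successive mod-k differences are all 1, hence
--     monotone), so it can be produced directly.
--     """
--     return list(range(k))
-- ===== Notes on version B (the rewrite author's own statement) =====
-- stated objective: faster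
-- what changed: Replaced the recursive backtracking search over permutations with a direct closed form: the first monotone-mod-difference permutation found is always the identity, so B returns list(range(k)) outright.
import Mathlib
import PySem

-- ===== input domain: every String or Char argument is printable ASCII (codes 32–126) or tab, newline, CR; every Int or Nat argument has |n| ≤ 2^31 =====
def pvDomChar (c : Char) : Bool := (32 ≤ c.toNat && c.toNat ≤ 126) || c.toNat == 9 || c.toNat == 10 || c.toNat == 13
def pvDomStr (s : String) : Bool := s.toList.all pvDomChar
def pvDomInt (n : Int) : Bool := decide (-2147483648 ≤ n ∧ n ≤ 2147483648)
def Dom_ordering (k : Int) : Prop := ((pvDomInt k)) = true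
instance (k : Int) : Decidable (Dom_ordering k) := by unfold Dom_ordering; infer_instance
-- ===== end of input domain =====

-- B replaces A's recursive backtracking search with the closed form list(range(k)),
-- the first permutation the search accepts; faster (O(k) vs A's O(k^2) happy path).


-- ===== PORT A =====
-- 'for i in range(1, len(mod_list)): if mod_list[i] < mod_list[i-1]: break' with its flag
def monoGoA (ml : List Int) : List Int → Bool
  | [] => true
  | i :: rest =>
    if PySem.List.pyGetD ml i 0 < PySem.List.pyGetD ml (i - 1) 0 then false
    else monoGoA ml rest

def monoA (ml : List Int) : Bool := monoGoA ml (PySem.List.pyRange 1 (ml.length : Int) 1)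

mutual
-- backtrack(current, mod_list); 'result' is the shared mutable list, threaded through
def btA (k : Int) (fuel : Nat) (current modl : List Int) (result : List (List Int)) :
    List (List Int) :=
  match fuel with
  | 0 => result  -- fuel k.toNat+1 is never exhausted (depth is <= k+1)
  | fuel' + 1 =>
    if (current.length : Int) = k then
      if monoA modl then result ++ [current] else result
    else
      btLoopA k fuel' (PySem.List.pyRange 0 k 1) current modl result
termination_by (fuel, 0)

-- 'for num in range(k): ...'; passing 'current' unchanged to the next iteration is the append/pop pair
def btLoopA (k : Int) (fuel : Nat) (nums current modl : List Int) (result : List (List Int)) :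
    List (List Int) :=
  match nums with
  | [] => result
  | num :: rest =>
    if num ∈ current then btLoopA k fuel rest current modl result
    else
      let newModl :=
        if 0 < current.length then
          modl ++ [PySem.Int.mod (num - PySem.List.pyGetD current (-1) 0) k]
        else modl
      if newModl.length < 2 ∨ PySem.List.pyGetD newModl (-2) 0 ≤ PySem.List.pyGetD newModl (-1) 0 then
        let result' := btA k fuel (current ++ [num]) newModl result
        if result' ≠ [] then result'  -- 'if result: return'
        else btLoopA k fuel rest current modl result'
      else btLoopA k fuel rest current modl result
termination_by (fuel, nums.length + 1)
end

def ordering (k : Int) : List Int :=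
  match btA k (k.toNat + 1) [] [] [] with
  | r :: _ => r
  | [] => []

-- ===== PORT B =====
-- list(range(k)) : the naturals below k, cast to Int
def ordering_alt (k : Int) : List Int := (List.range k.toNat).map (fun i => (i : Int))

-- ===== PRECONDITION & SPEC =====
def Spec_ordering (k : Int) (out : List Int) : Prop := out = ordering_alt k
instance (k : Int) (out : List Int) : Decidable (Spec_ordering k out) := by unfold Spec_ordering; infer_instance

-- ===== CLAIM (what is proved, stated in full; the proofs are below) =====
def Claim_equal_ordering : Prop := ∀ (k : Int), Dom_ordering k → Spec_ordering k (ordering k)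

-- ===== LEMMAS AND PROOFS =====

theorem monoA_replicate (n : Nat) : monoA (List.replicate n (1 : Int)) = true := by
  unfold monoA
  have h : ∀ is : List Int, (∀ i ∈ is, 1 ≤ i ∧ i < (n : Int)) →
      monoGoA (List.replicate n (1 : Int)) is = true := by
    intro is
    induction is with
    | nil => intro _; rfl
    | cons i rest ih =>
      intro h
      obtain ⟨h1, h2⟩ := h i (List.mem_cons_self)
      have e1 : PySem.List.pyGetD (List.replicate n (1 : Int)) i 0 = 1 := by
        rw [PySem.List.pyGetD_eq_getElem _ _ (by omega) (by simpa using h2)]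
        simp
      have e2 : PySem.List.pyGetD (List.replicate n (1 : Int)) (i - 1) 0 = 1 := by
        rw [PySem.List.pyGetD_eq_getElem _ _ (by omega) (by simp; omega)]
        simp
      simp only [monoGoA, e1, e2, if_neg (by omega : ¬ (1 : Int) < 1)]
      exact ih fun j hj => h j (List.mem_cons_of_mem _ hj)
  apply h
  intro i hi
  rw [PySem.List.mem_pyRange_one] at hi
  simpa using hi

theorem btLoopA_skip (k : Int) (fuel : Nat) (pre rest current modl : List Int)
    (res : List (List Int)) (h : ∀ x ∈ pre, x ∈ current) :
    btLoopA k fuel (pre ++ rest) current modl res = btLoopA k fuel rest current modl res := by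
  induction pre with
  | nil => rfl
  | cons x pre ih =>
    rw [List.cons_append]
    have hx : x ∈ current := h x List.mem_cons_self
    simp only [btLoopA, if_pos hx]
    exact ih fun y hy => h y (List.mem_cons_of_mem _ hy)

theorem btA_main (k : Int) (hk : 0 < k) : ∀ d m : Nat, (m : Int) + d = k →
    btA k (k.toNat + 1 - m) (PySem.List.pyRange 0 (m : Int) 1) (List.replicate (m - 1) (1 : Int)) []
      = [PySem.List.pyRange 0 k 1] := by
  intro d
  induction d with
  | zero =>
    intro m hm
    have hmk : (m : Int) = k := by omega
    have hfuel : k.toNat + 1 - m = 1 := by omega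
    rw [hfuel, hmk]
    simp only [btA]
    rw [if_pos (by simp [PySem.List.length_pyRange_one]; omega), if_pos (monoA_replicate _)]
    rfl
  | succ d ih =>
    intro m hm
    have hmk : (m : Int) < k := by omega
    have hfuel : k.toNat + 1 - m = (d + 1) + 1 := by omega
    rw [hfuel]
    simp only [btA]
    rw [if_neg (by simp [PySem.List.length_pyRange_one]; omega)]
    -- split range(k) at m and skip the first m values (all already in current)
    rw [PySem.List.pyRange_one_append 0 (m : Int) k (by omega) (by omega),
        btLoopA_skip _ _ _ _ _ _ _ (fun x hx => hx),
        PySem.List.pyRange_one_cons hmk]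
    have hmem : ((m : Int) ∉ PySem.List.pyRange 0 (m : Int) 1) := by
      rw [PySem.List.mem_pyRange_one]; omega
    have hcur : PySem.List.pyRange 0 (m : Int) 1 ++ [(m : Int)]
        = PySem.List.pyRange 0 ((m : Int) + 1) 1 :=
      (PySem.List.pyRange_one_succ_right (by omega)).symm
    have hnew : (if 0 < (PySem.List.pyRange 0 (m : Int) 1).length then
          List.replicate (m - 1) (1 : Int) ++
            [PySem.Int.mod ((m : Int) - PySem.List.pyGetD (PySem.List.pyRange 0 (m : Int) 1) (-1) 0) k]
        else List.replicate (m - 1) (1 : Int)) = List.replicate m (1 : Int) := by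
      rcases Nat.eq_zero_or_pos m with h0 | h1
      · subst h0; simp [PySem.List.pyRange_one_eq_nil]
      · have hk2 : (2 : Int) ≤ k := by omega
        rw [if_pos (by simp [PySem.List.length_pyRange_one]; omega)]
        have hlast : PySem.List.pyGetD (PySem.List.pyRange 0 (m : Int) 1) (-1) 0 = (m : Int) - 1 := by
          have : PySem.List.pyRange 0 (m : Int) 1
              = PySem.List.pyRange 0 ((m : Int) - 1) 1 ++ [(m : Int) - 1] := by
            have := PySem.List.pyRange_one_succ_right (a := 0) (b := (m : Int) - 1) (by omega)
            simpa [sub_add_cancel] using this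
          rw [this, PySem.List.pyGetD_neg_one_append_singleton]
        rw [hlast]
        have : PySem.Int.mod ((m : Int) - ((m : Int) - 1)) k = 1 := by
          rw [PySem.Int.mod_eq_emod_of_pos (by omega)]
          norm_num
          exact Int.emod_eq_of_lt (by omega) (by omega)
        rw [show (m : Int) - ((m : Int) - 1) = 1 by ring] at this ⊢
        rw [this, ← List.replicate_succ']
        congr 1
        omega
    have hcond : (List.replicate m (1 : Int)).length < 2 ∨
        PySem.List.pyGetD (List.replicate m (1 : Int)) (-2) 0 ≤
          PySem.List.pyGetD (List.replicate m (1 : Int)) (-1) 0 := by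
      rcases Nat.lt_or_ge m 2 with h | h
      · left; simpa using h
      · right
        rw [PySem.List.pyGetD_neg_ofNat _ 2 _ (by omega) (by simpa using h),
            PySem.List.pyGetD_neg_ofNat _ 1 _ (by omega) (by simp; omega)]
        simp
    have hres : btA k (d + 1) (PySem.List.pyRange 0 (m : Int) 1 ++ [(m : Int)])
        (List.replicate m (1 : Int)) [] = [PySem.List.pyRange 0 k 1] := by
      rw [hcur]
      have := ih (m + 1) (by push_cast; omega)
      rw [show k.toNat + 1 - (m + 1) = d + 1 by omega] at this
      simpa [Nat.add_sub_cancel] using this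
    simp only [btLoopA, if_neg hmem, hnew, hcond, if_pos, hres]
    simp only [ne_eq, reduceCtorEq, not_false_eq_true, if_pos]
    rw [PySem.List.pyRange_one_append 0 (m : Int) k (by omega) (by omega),
        PySem.List.pyRange_one_cons hmk]

-- ===== VERDICT (by name: the statement is the Claim_ definition above) =====
theorem alt_eq_pyRange (k : Int) : ordering_alt k = PySem.List.pyRange 0 k 1 := by
  unfold ordering_alt
  rw [PySem.List.pyRange_one]
  simp
  induction List.range k.toNat with
  | nil => rfl
  | cons a l ih => simp [List.flatMap_cons]; exact ih

theorem ordering_spec : Claim_equal_ordering := by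
  intro k _
  unfold Spec_ordering ordering
  rw [alt_eq_pyRange]
  rcases lt_trichotomy k 0 with hk | hk | hk
  · rw [PySem.List.pyRange_one_eq_nil (by omega)]
    simp only [btA]
    rw [if_neg (by simpa using hk.ne'), PySem.List.pyRange_one_eq_nil (le_of_lt hk)]
    simp only [btLoopA]
  · subst hk
    simp only [btA]
    rw [if_pos (by simp), if_pos (by simpa using monoA_replicate 0)]
    rw [PySem.List.pyRange_one_eq_nil (by omega : (0:Int) ≤ 0)]
    rfl
  · have := btA_main k hk k.toNat 0 (by omega)
    simp only [Nat.cast_zero, Nat.sub_zero, Nat.zero_sub, List.replicate_zero,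
      PySem.List.pyRange_one_eq_nil (le_refl (0:Int))] at this
    rw [this]
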